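-- pv_equiv track=rewrite | github.com/Alice-Bob-SW/qiskit-alice-bob-provider | qiskit_alice_bob_provider/processor/utils.py | pauli_label_to_index
-- ===== SOURCE A (Python) =====
-- def pauli_label_to_index(pauli_str: str) -> int:
--     label_to_int = dict(zip('IXYZ', range(4)))
--     sum = 0
--     for i, c in enumerate(pauli_str[::-1]):
--         try:
--             sum += label_to_int[c] * (4**i)
--         except KeyError as e:
--             raise ValueError(
--                 f'Unrecognized Pauli error label "{pauli_str}"'
--             ) from e
--     return sum
-- ===== SOURCE B (Python) =====
-- def pauli_label_to_index(pauli_str: str) -> int: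
--     label_to_int = dict(zip('IXYZ', range(4)))
--     acc = 0
--     for c in pauli_str:
--         try:
--             acc = acc * 4 + label_to_int[c]
--         except KeyError as e:
--             raise ValueError(
--                 f'Unrecognized Pauli error label "{pauli_str}"'
--             ) from e
--     return acc
-- ===== Notes on version B (the rewrite author's own statement) =====
-- stated objective: simpler
-- what changed: Horner's method: forward scan with acc = acc*4 + digit, replacing the reversed-string enumerate loop that sums digit * 4**i with per-step exponentiation.
import Mathlib
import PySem

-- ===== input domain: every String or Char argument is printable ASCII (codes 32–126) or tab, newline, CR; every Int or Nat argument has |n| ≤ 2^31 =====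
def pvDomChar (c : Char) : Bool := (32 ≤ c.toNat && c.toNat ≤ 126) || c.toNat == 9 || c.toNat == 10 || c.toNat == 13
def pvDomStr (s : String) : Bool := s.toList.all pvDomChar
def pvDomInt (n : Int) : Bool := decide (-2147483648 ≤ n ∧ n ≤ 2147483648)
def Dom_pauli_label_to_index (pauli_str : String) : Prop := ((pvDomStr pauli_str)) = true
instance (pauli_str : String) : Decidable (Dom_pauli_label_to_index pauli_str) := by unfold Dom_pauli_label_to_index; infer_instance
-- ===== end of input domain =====

-- B replaces the reversed-enumerate sum of digit * 4**i by a forward Horner scan (acc = acc*4 + digit): simpler, no exponentiation.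
-- Return-value equivalence on Pre_ (strings over IXYZ, where the Python A returns instead of raising ValueError).

-- label_to_int = dict(zip('IXYZ', range(4))), shared literal dict of both sources
def pvLabelDict : PySem.Dict Char Int :=
  PySem.Dict.ofList [('I', 0), ('X', 1), ('Y', 2), ('Z', 3)]

-- ===== PORT A =====
-- for i, c in enumerate(pauli_str[::-1]): sum += label_to_int[c] * 4**i
-- (the KeyError/ValueError path is excluded by Pre_; the port reads 0 there)
def pauli_label_to_index (pauli_str : String) : Int :=
  (PySem.List.enumerate pauli_str.toList.reverse 0).foldl
    (fun sum p => sum + pvLabelDict.getD p.2 0 * 4 ^ p.1.toNat) 0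

-- ===== PORT B =====
-- for c in pauli_str: acc = acc*4 + label_to_int[c]
def pauli_label_to_index_alt (pauli_str : String) : Int :=
  pauli_str.toList.foldl (fun acc c => acc * 4 + pvLabelDict.getD c 0) 0

-- ===== PRECONDITION & SPEC =====
-- Pre_: every character is one of I, X, Y, Z — exactly the inputs on which the Python A returns (it raises ValueError otherwise)
def Pre_pauli_label_to_index (pauli_str : String) : Prop :=
  (pauli_str.toList.all fun c => c == 'I' || c == 'X' || c == 'Y' || c == 'Z') = true
instance (pauli_str : String) : Decidable (Pre_pauli_label_to_index pauli_str) := by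
  unfold Pre_pauli_label_to_index; infer_instance
def pvWitness_pauli_label_to_index : String := "XIZY"

def Spec_pauli_label_to_index (pauli_str : String) (out : Int) : Prop := out = pauli_label_to_index_alt pauli_str
instance (pauli_str : String) (out : Int) : Decidable (Spec_pauli_label_to_index pauli_str out) := by unfold Spec_pauli_label_to_index; infer_instance

-- ===== CLAIM (what is proved, stated in full; the proofs are below) =====
def Claim_equal_pauli_label_to_index : Prop := ∀ (pauli_str : String), Dom_pauli_label_to_index pauli_str → Pre_pauli_label_to_index pauli_str → Spec_pauli_label_to_index pauli_str (pauli_label_to_index pauli_str)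

-- ===== LEMMAS AND PROOFS =====

-- Horner's fold from an arbitrary accumulator splits off acc * 4^len
theorem pv_horner_shift (f : Char → Int) :
    ∀ (l : List Char) (acc : Int),
      l.foldl (fun a c => a * 4 + f c) acc
        = acc * 4 ^ l.length + l.foldl (fun a c => a * 4 + f c) 0 := by
  intro l
  induction l with
  | nil => intro acc; simp
  | cons c l ih =>
    intro acc
    simp only [List.foldl_cons, List.length_cons]
    rw [ih (acc * 4 + f c), ih (0 * 4 + f c)]
    ring

-- the forward Horner fold equals A's reversed positional sum
theorem pv_horner_eq_possum (f : Char → Int) :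
    ∀ (l : List Char),
      l.foldl (fun a c => a * 4 + f c) 0
        = (PySem.List.enumerate l.reverse 0).foldl
            (fun s p => s + f p.2 * 4 ^ p.1.toNat) 0 := by
  intro l
  induction l with
  | nil => simp
  | cons c l ih =>
    rw [List.foldl_cons, pv_horner_shift, List.reverse_cons,
        PySem.List.enumerate_append, List.foldl_append, ← ih]
    simp
    ring

-- ===== VERDICT (by name: the statement is the Claim_ definition above) =====
theorem pauli_label_to_index_spec : Claim_equal_pauli_label_to_index := by
  intro s _ _
  unfold Spec_pauli_label_to_index pauli_label_to_index pauli_label_to_index_alt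
  exact (pv_horner_eq_possum (fun c => pvLabelDict.getD c 0) s.toList).symm
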